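-- pv_equiv track=rewrite | github.com/linguosaur/AoC2020 | day10.py | getOptionalStreaks
-- ===== SOURCE A (Python) =====
-- def getOptionalStreaks(joltDiffs):
-- 	optionalStreaks = []
-- 	optionalStreak = 0
-- 	for i in range(len(joltDiffs)):
-- 		if joltDiffs[i] == 1:
-- 			optionalStreak += 1
-- 		elif joltDiffs[i] == 3:
-- 			if optionalStreak > 0:
-- 				optionalStreak -= 1
-- 			optionalStreaks.append(optionalStreak)
-- 			optionalStreak = 0
--
-- 	return optionalStreaks
-- ===== SOURCE B (Python) =====
-- def getOptionalStreaks(joltDiffs):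
-- 	# Pass 1: split the list into segments terminated by 3s (trailing remainder dropped).
-- 	segments = []
-- 	current = []
-- 	for v in joltDiffs:
-- 		if v == 3:
-- 			segments.append(current)
-- 			current = []
-- 		else:
-- 			current.append(v)
-- 	# Pass 2: each segment contributes max(#ones - 1, 0).
-- 	return [max(seg.count(1) - 1, 0) for seg in segments]
-- ===== Notes on version B (the rewrite author's own statement) =====
-- stated objective: alternative
-- what changed: Replaces the single incremental-counter scan with a two-pass build-segments-then-aggregate shape: first split the list into segments ending at each 3 (dropping the trailing remainder), then map each segment to max(seg.count(1)-1, 0).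
import Mathlib
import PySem

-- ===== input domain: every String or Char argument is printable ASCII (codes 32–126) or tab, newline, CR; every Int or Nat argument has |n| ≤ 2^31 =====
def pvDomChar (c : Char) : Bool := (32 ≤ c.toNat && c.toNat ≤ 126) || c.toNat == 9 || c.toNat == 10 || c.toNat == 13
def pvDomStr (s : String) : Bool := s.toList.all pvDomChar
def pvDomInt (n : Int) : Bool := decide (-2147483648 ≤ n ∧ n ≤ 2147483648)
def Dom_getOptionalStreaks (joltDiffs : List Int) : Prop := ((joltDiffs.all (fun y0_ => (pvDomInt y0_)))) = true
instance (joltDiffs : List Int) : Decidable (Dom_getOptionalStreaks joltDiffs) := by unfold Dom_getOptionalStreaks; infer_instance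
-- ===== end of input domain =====

-- B replaces A's single incremental-counter scan with a two-pass shape (split into
-- 3-terminated segments, then map each segment to max(#ones - 1, 0)); objective: alternative.


-- ===== PORT A =====
-- for i in range(len(joltDiffs)): accumulate (optionalStreaks, optionalStreak)
def getOptionalStreaks (joltDiffs : List Int) : List Int :=
  (joltDiffs.foldl
    (fun (st : List Int × Int) d =>
      if d = 1 then (st.1, st.2 + 1)
      else if d = 3 then
        (st.1 ++ [if st.2 > 0 then st.2 - 1 else st.2], 0)
      else st)
    ([], 0)).1

-- ===== PORT B =====
-- Pass 1 of Source B: split into segments terminated by 3s (trailing remainder dropped)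
def pvSegments (joltDiffs : List Int) : List (List Int) :=
  (joltDiffs.foldl
    (fun (st : List (List Int) × List Int) v =>
      if v = 3 then (st.1 ++ [st.2], ([] : List Int))
      else (st.1, st.2 ++ [v]))
    ([], [])).1

-- Pass 2 of Source B: [max(seg.count(1) - 1, 0) for seg in segments]
def getOptionalStreaks_alt (joltDiffs : List Int) : List Int :=
  (pvSegments joltDiffs).map (fun seg => max ((PySem.List.count seg 1 : Int) - 1) 0)

-- ===== PRECONDITION & SPEC =====
def Spec_getOptionalStreaks (joltDiffs : List Int) (out : List Int) : Prop := out = getOptionalStreaks_alt joltDiffs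
instance (joltDiffs : List Int) (out : List Int) : Decidable (Spec_getOptionalStreaks joltDiffs out) := by unfold Spec_getOptionalStreaks; infer_instance

-- ===== CLAIM (what is proved, stated in full; the proofs are below) =====
def Claim_equal_getOptionalStreaks : Prop := ∀ (joltDiffs : List Int), Dom_getOptionalStreaks joltDiffs → Spec_getOptionalStreaks joltDiffs (getOptionalStreaks joltDiffs)

-- ===== LEMMAS AND PROOFS =====

-- The segment's contribution matches A's decrement-then-emit value when the counter equals the 1-count.
lemma pvEmit_eq (cur : List Int) :
    max ((PySem.List.count cur 1 : Int) - 1) 0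
      = (if ((cur.count 1 : Int)) > 0 then (cur.count 1 : Int) - 1 else (cur.count 1 : Int)) := by
  rw [PySem.List.count_eq]
  omega

-- Loop invariant: A's fold state is B's fold state through (map emit, count of 1s).
lemma pvFold_inv : ∀ (l : List Int) (segs : List (List Int)) (cur : List Int),
    (l.foldl
      (fun (st : List Int × Int) d =>
        if d = 1 then (st.1, st.2 + 1)
        else if d = 3 then
          (st.1 ++ [if st.2 > 0 then st.2 - 1 else st.2], 0)
        else st)
      (segs.map (fun seg => max ((PySem.List.count seg 1 : Int) - 1) 0), (cur.count 1 : Int))).1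
    = ((l.foldl
        (fun (st : List (List Int) × List Int) v =>
          if v = 3 then (st.1 ++ [st.2], ([] : List Int))
          else (st.1, st.2 ++ [v]))
        (segs, cur)).1).map (fun seg => max ((PySem.List.count seg 1 : Int) - 1) 0) := by
  intro l
  induction l with
  | nil => intro segs cur; simp
  | cons d t ih =>
    intro segs cur
    by_cases h1 : d = 1
    · subst h1
      simp only [List.foldl_cons, reduceIte, if_neg (by norm_num : (1 : Int) ≠ 3)]
      have : ((cur.count 1 : Int)) + 1 = (((cur ++ [1]).count 1 : Int)) := by
        simp [List.count_append]
      rw [this]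
      exact ih segs (cur ++ [1])
    · by_cases h3 : d = 3
      · subst h3
        simp only [List.foldl_cons, reduceIte, if_neg (by norm_num : (3 : Int) ≠ 1)]
        have : (segs.map (fun seg => max ((PySem.List.count seg 1 : Int) - 1) 0)
              ++ [if ((cur.count 1 : Int)) > 0 then (cur.count 1 : Int) - 1 else (cur.count 1 : Int)])
            = (segs ++ [cur]).map (fun seg => max ((PySem.List.count seg 1 : Int) - 1) 0) := by
          rw [List.map_append, List.map_cons, List.map_nil, pvEmit_eq]
        rw [this]
        have h0 : (0 : Int) = ((([] : List Int).count 1 : Int)) := by simp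
        rw [h0]
        exact ih (segs ++ [cur]) []
      · simp only [List.foldl_cons, if_neg h1, if_neg h3]
        have : ((cur.count 1 : Int)) = (((cur ++ [d]).count 1 : Int)) := by
          simp [List.count_append, h1]
        rw [this]
        exact ih segs (cur ++ [d])

-- ===== VERDICT (by name: the statement is the Claim_ definition above) =====
theorem getOptionalStreaks_spec : Claim_equal_getOptionalStreaks := by
  intro joltDiffs _
  unfold Spec_getOptionalStreaks getOptionalStreaks getOptionalStreaks_alt pvSegments
  have h := pvFold_inv joltDiffs [] []
  simpa using h
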